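-- pv_equiv track=rewrite | github.com/eeeeeexy/Satisfaction-TA | Mymethods.py | conflict_check
-- ===== SOURCE A (Python) =====
-- def conflict_check(best_assign):
--
--     flag = True
--     for i in best_assign.keys():
--         for j in best_assign.keys():
--             if i == j:
--                 continue
--             else:
--                 if len(set(best_assign[i]).intersection(set(best_assign[j]))) != 0:
--                     flag = False
--                     break
--
--     return flag
-- ===== SOURCE B (Python) =====
-- def conflict_check(best_assign):
--     seen = set()
--     for vals in best_assign.values():
--         vs = set(vals)
--         if not seen.isdisjoint(vs):
--             return False
--         seen |= vs
--     return True
-- ===== Notes on version B (the rewrite author's own statement) =====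
-- stated objective: faster
-- what changed: Replaced the all-pairs key loop with per-pair set intersections by a single pass over the values that accumulates one global seen-set and reports a conflict (with early exit) as soon as an element reappears under a later key.
import Mathlib
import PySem

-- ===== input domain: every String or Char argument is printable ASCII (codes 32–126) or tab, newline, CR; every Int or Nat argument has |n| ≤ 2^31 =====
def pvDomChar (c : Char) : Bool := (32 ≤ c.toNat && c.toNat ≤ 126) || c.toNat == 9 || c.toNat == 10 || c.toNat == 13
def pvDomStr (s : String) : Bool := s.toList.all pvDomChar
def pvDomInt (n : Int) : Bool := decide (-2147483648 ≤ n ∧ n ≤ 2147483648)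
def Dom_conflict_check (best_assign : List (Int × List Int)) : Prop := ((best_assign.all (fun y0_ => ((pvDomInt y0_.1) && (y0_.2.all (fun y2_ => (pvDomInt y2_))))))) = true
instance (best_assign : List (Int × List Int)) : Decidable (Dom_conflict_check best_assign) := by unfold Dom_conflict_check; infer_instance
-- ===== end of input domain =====

-- B replaces A's all-pairs set-intersection test by one pass over the values with a global seen-set and early exit.

-- ===== PORT A =====
-- inner 'for j in best_assign.keys()' loop: continue on i == j, break (flag = False) on a non-empty intersection
def pvInnerA (d : PySem.Dict Int (List Int)) (i : Int) : List Int → Bool → Bool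
  | [], flag => flag
  | j :: rest, flag =>
    if i == j then pvInnerA d i rest flag
    else if PySem.Set.len (PySem.Set.inter (PySem.Set.ofList (d.getD i [])) (PySem.Set.ofList (d.getD j []))) ≠ 0 then
      false
    else pvInnerA d i rest flag

def conflict_check (best_assign : List (Int × List Int)) : Bool :=
  let d := PySem.Dict.ofList best_assign
  d.keys.foldl (fun flag i => pvInnerA d i d.keys flag) true

-- ===== PORT B =====
-- 'for vals in best_assign.values(): if not seen.isdisjoint(set(vals)): return False; seen |= set(vals)'
def pvGoB : List (List Int) → PySem.Set Int → Bool
  | [], _ => true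
  | vals :: rest, seen =>
    let vs := PySem.Set.ofList vals
    if PySem.Set.isdisjoint seen vs then pvGoB rest (PySem.Set.union seen vs) else false

def conflict_check_alt (best_assign : List (Int × List Int)) : Bool :=
  pvGoB (PySem.Dict.ofList best_assign).values PySem.Set.empty

-- ===== PRECONDITION & SPEC =====
def Spec_conflict_check (best_assign : List (Int × List Int)) (out : Bool) : Prop := out = conflict_check_alt best_assign
instance (best_assign : List (Int × List Int)) (out : Bool) : Decidable (Spec_conflict_check best_assign out) := by unfold Spec_conflict_check; infer_instance

-- ===== CLAIM (what is proved, stated in full; the proofs are below) =====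
def Claim_equal_conflict_check : Prop := ∀ (best_assign : List (Int × List Int)), Dom_conflict_check best_assign → Spec_conflict_check best_assign (conflict_check best_assign)

-- ===== LEMMAS AND PROOFS =====

theorem pvLenInter_eq_zero_iff (u v : List Int) :
    PySem.Set.len (PySem.Set.inter (PySem.Set.ofList u) (PySem.Set.ofList v)) = 0 ↔ ∀ x ∈ u, x ∉ v := by
  have h : ∀ x, x ∈ PySem.Set.inter (PySem.Set.ofList u) (PySem.Set.ofList v) ↔ x ∈ u ∧ x ∈ v := by
    intro x; simp [PySem.Set.mem_inter, PySem.Set.mem_ofList]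
  constructor
  · intro hlen x hxu hxv
    have hnil : PySem.Set.inter (PySem.Set.ofList u) (PySem.Set.ofList v) = [] := by
      simpa [PySem.Set.len] using hlen
    have := (h x).mpr ⟨hxu, hxv⟩
    simp [hnil] at this
  · intro hdisj
    have hnil : PySem.Set.inter (PySem.Set.ofList u) (PySem.Set.ofList v) = [] := by
      rw [List.eq_nil_iff_forall_not_mem]
      intro x hx
      rcases (h x).mp hx with ⟨hu, hv⟩
      exact hdisj x hu hv
    simp [PySem.Set.len, hnil]

theorem pvInnerA_true_iff (d : PySem.Dict Int (List Int)) (i : Int) (ks : List Int) (flag : Bool) :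
    pvInnerA d i ks flag = true ↔
      flag = true ∧ ∀ j ∈ ks, j ≠ i → ∀ x ∈ d.getD i [], x ∉ d.getD j [] := by
  induction ks generalizing flag with
  | nil => simp [pvInnerA]
  | cons j rest ih =>
    by_cases hij : i = j
    · rw [show pvInnerA d i (j :: rest) flag = pvInnerA d i rest flag from by simp [pvInnerA, hij], ih]
      constructor
      · rintro ⟨hf, hrest⟩
        refine ⟨hf, fun j' hj' hne => ?_⟩
        rcases List.mem_cons.mp hj' with rfl | hmem
        · exact (hne hij.symm).elim
        · exact hrest j' hmem hne
      · rintro ⟨hf, hall⟩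
        exact ⟨hf, fun j' hj' hne => hall j' (List.mem_cons_of_mem _ hj') hne⟩
    · by_cases hd : PySem.Set.len (PySem.Set.inter (PySem.Set.ofList (d.getD i [])) (PySem.Set.ofList (d.getD j []))) = 0
      · have hdisj := (pvLenInter_eq_zero_iff _ _).mp hd
        rw [show pvInnerA d i (j :: rest) flag = pvInnerA d i rest flag from by
              simp only [pvInnerA]; rw [if_neg (by simp [hij]), if_neg (fun h => h hd)], ih]
        constructor
        · rintro ⟨hf, hrest⟩
          refine ⟨hf, fun j' hj' hne => ?_⟩
          rcases List.mem_cons.mp hj' with rfl | hmem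
          · exact hdisj
          · exact hrest j' hmem hne
        · rintro ⟨hf, hall⟩
          exact ⟨hf, fun j' hj' hne => hall j' (List.mem_cons_of_mem _ hj') hne⟩
      · rw [show pvInnerA d i (j :: rest) flag = false from by
              simp only [pvInnerA]; rw [if_neg (by simp [hij]), if_pos hd]]
        simp only [Bool.false_eq_true, false_iff]
        rintro ⟨-, hall⟩
        exact hd ((pvLenInter_eq_zero_iff _ _).mpr (hall j List.mem_cons_self (fun h => hij h.symm)))

theorem pvA_true_iff (d : PySem.Dict Int (List Int)) (ks : List Int) (flag : Bool) :
    ks.foldl (fun flag i => pvInnerA d i d.keys flag) flag = true ↔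
      flag = true ∧ ∀ i ∈ ks, ∀ j ∈ d.keys, j ≠ i → ∀ x ∈ d.getD i [], x ∉ d.getD j [] := by
  induction ks generalizing flag with
  | nil => simp
  | cons i rest ih =>
    rw [List.foldl_cons, ih, pvInnerA_true_iff]
    constructor
    · rintro ⟨⟨hf, hi⟩, hrest⟩
      refine ⟨hf, fun i' hi' => ?_⟩
      rcases List.mem_cons.mp hi' with rfl | hmem
      · exact hi
      · exact hrest i' hmem
    · rintro ⟨hf, hall⟩
      exact ⟨⟨hf, hall i List.mem_cons_self⟩, fun i' hi' => hall i' (List.mem_cons_of_mem _ hi')⟩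

theorem pvGoB_true_iff (vls : List (List Int)) (seen : PySem.Set Int) :
    pvGoB vls seen = true ↔
      (∀ v ∈ vls, ∀ x ∈ v, x ∉ seen) ∧ vls.Pairwise (fun u v => ∀ x ∈ u, x ∉ v) := by
  induction vls generalizing seen with
  | nil => simp [pvGoB]
  | cons v rest ih =>
    by_cases hd : PySem.Set.isdisjoint seen (PySem.Set.ofList v) = true
    · have hdisj : ∀ x ∈ seen, x ∉ v := by
        have h2 := (PySem.Set.isdisjoint_iff seen (PySem.Set.ofList v)).mp hd
        intro x hx hxv
        exact h2 x hx ((PySem.Set.mem_ofList _ _).mpr hxv)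
      rw [show pvGoB (v :: rest) seen = pvGoB rest (PySem.Set.union seen (PySem.Set.ofList v)) from by
            simp only [pvGoB]; rw [if_pos hd], ih]
      have hmem : ∀ x, x ∈ PySem.Set.union seen (PySem.Set.ofList v) ↔ x ∈ seen ∨ x ∈ v := by
        intro x; simp [PySem.Set.mem_union, PySem.Set.mem_ofList]
      constructor
      · rintro ⟨hall, hpw⟩
        refine ⟨?_, List.Pairwise.cons ?_ hpw⟩
        · intro u hu x hx hxs
          rcases List.mem_cons.mp hu with rfl | hmem'
          · exact hdisj x hxs hx
          · exact hall u hmem' x hx ((hmem x).mpr (Or.inl hxs))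
        · intro u hu x hxv hxu
          exact hall u hu x hxu ((hmem x).mpr (Or.inr hxv))
      · rintro ⟨hall, hpw⟩
        rcases List.pairwise_cons.mp hpw with ⟨hv, hrest⟩
        refine ⟨?_, hrest⟩
        intro u hu x hx hxU
        rcases (hmem x).mp hxU with hxs | hxv
        · exact hall u (List.mem_cons_of_mem _ hu) x hx hxs
        · exact hv u hu x hxv hx
    · rw [show pvGoB (v :: rest) seen = false from by
            simp only [pvGoB]; rw [if_neg hd]]
      simp only [Bool.false_eq_true, false_iff]
      rintro ⟨hall, -⟩
      apply hd
      rw [PySem.Set.isdisjoint_iff]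
      intro x hxs hxv
      exact hall v List.mem_cons_self x ((PySem.Set.mem_ofList _ _).mp hxv) hxs

-- ===== VERDICT (by name: the statement is the Claim_ definition above) =====
theorem conflict_check_spec : Claim_equal_conflict_check := by
  intro best_assign _
  unfold Spec_conflict_check conflict_check conflict_check_alt
  set d := PySem.Dict.ofList best_assign with hdd
  have hnd : d.keys.Nodup := PySem.Dict.nodup_keys_ofList best_assign
  have hvals : d.values = d.keys.map (fun k => d.getD k []) :=
    PySem.Dict.values_eq_map_keys d hnd []
  have hA := pvA_true_iff d d.keys true
  have hB := pvGoB_true_iff d.values PySem.Set.empty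
  have hBprop : (pvGoB d.values PySem.Set.empty = true) ↔
      d.keys.Pairwise (fun a b => ∀ x ∈ d.getD a [], x ∉ d.getD b []) := by
    rw [hB, hvals, List.pairwise_map]
    constructor
    · rintro ⟨-, hpw⟩; exact hpw
    · intro hpw
      refine ⟨?_, hpw⟩
      intro v _ x _ hxe
      simp [PySem.Set.empty] at hxe
  rw [Bool.eq_iff_iff, hBprop, hA]
  constructor
  · rintro ⟨-, hall⟩
    refine List.Pairwise.imp_of_mem ?_ hnd
    intro a b ha hb hne
    exact hall a ha b hb (fun h => hne h.symm)
  · intro hpw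
    refine ⟨rfl, ?_⟩
    intro i hi j hj hne
    have hsymm : Symmetric (fun a b : Int => ∀ x ∈ d.getD a [], x ∉ d.getD b []) := by
      intro a b hab x hxb hxa
      exact hab x hxa hxb
    exact hpw.forall hsymm hi hj (fun h => hne h.symm)
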